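-- pv_equiv track=rewrite | github.com/baldFemale/OpenInnovationFramework | Independent_default/partial_20/Landscape.py | cog_state_alternatives
-- ===== SOURCE A (Python) =====
-- from itertools import product
--
-- def cog_state_alternatives(cog_state=None):
--     alternative_pool = []
--     for bit in cog_state:
--         if bit in ["0", "1", "2", "3"]:
--             alternative_pool.append(bit)
--         elif bit == "A":
--             alternative_pool.append(["0", "1"])
--         elif bit == "B":
--             alternative_pool.append(["2", "3"])
--         elif bit == "*":
--             alternative_pool.append(["0", "1", "2", "3"])
--         else:
--             raise ValueError("Unsupported bit value: ", bit)
--     return [i for i in product(*alternative_pool)]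
-- ===== SOURCE B (Python) =====
-- _OPT = {"0": "0", "1": "1", "2": "2", "3": "3", "A": "01", "B": "23", "*": "0123"}
--
-- def cog_state_alternatives(cog_state=None):
--     radices = []
--     total = 1
--     for bit in cog_state:
--         opts = _OPT.get(bit)
--         if opts is None:
--             raise ValueError("Unsupported bit value: ", bit)
--         radices.append(opts)
--         total *= len(opts)
--     n = len(radices)
--     out = []
--     for k in range(total):
--         tup = [None] * n
--         rem = k
--         for i in range(n - 1, -1, -1):
--             rem, d = divmod(rem, len(radices[i]))
--             tup[i] = radices[i][d]
--         out.append(tuple(tup))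
--     return out
-- ===== Notes on version B (the rewrite author's own statement) =====
-- stated objective: alternative
-- what changed: Replaces the if/elif chain plus itertools.product with a radix table and mixed-radix rank decoding: it computes the total count and decodes each rank k into a tuple by repeated divmod, never building any Cartesian product incrementally.
import Mathlib
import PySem

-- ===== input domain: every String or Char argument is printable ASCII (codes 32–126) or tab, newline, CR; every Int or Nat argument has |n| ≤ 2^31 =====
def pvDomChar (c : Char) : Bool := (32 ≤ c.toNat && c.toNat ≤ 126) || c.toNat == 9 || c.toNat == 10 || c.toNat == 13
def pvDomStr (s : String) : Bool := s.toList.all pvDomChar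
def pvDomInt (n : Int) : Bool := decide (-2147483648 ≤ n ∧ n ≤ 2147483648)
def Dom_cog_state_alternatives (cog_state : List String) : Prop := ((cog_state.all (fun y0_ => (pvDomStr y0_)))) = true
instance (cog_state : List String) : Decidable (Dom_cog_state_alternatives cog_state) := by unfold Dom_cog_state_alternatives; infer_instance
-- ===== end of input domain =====

-- B replaces A's if/elif chain + itertools.product by mixed-radix rank decoding:
-- it counts the alternatives and decodes each rank k by repeated divmod (alternative
-- decomposition, same cost); equivalence is proved on inputs where A does not raise.

-- ===== PORT A =====
-- the if/elif chain of A: option list for one bit (none = ValueError)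
def pvOptA (bit : String) : Option (List String) :=
  if bit = "0" ∨ bit = "1" ∨ bit = "2" ∨ bit = "3" then some [bit]
  else if bit = "A" then some ["0", "1"]
  else if bit = "B" then some ["2", "3"]
  else if bit = "*" then some ["0", "1", "2", "3"]
  else none

-- the loop building alternative_pool (none as soon as a bit raises)
def pvBuildPool : List String → Option (List (List String))
  | [] => some []
  | b :: rest =>
    match pvOptA b, pvBuildPool rest with
    | some o, some pool => some (o :: pool)
    | _, _ => none

-- itertools.product over the pool (first coordinate varies slowest)
def pvProduct : List (List String) → List (List String)
  | [] => [[]]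
  | l :: ls => l.flatMap fun x => (pvProduct ls).map (x :: ·)

def cog_state_alternatives (cog_state : List String) : List (List String) :=
  match pvBuildPool cog_state with
  | some pool => pvProduct pool
  | none => []  -- ValueError in Python; excluded by Pre_

-- ===== PORT B =====
-- the _OPT table (option strings as lists of one-char strings)
def pvTableB : PySem.Dict String (List String) :=
  PySem.Dict.ofList [("0", ["0"]), ("1", ["1"]), ("2", ["2"]), ("3", ["3"]),
   ("A", ["0", "1"]), ("B", ["2", "3"]), ("*", ["0", "1", "2", "3"])]

-- B's first loop: gather radices and multiply up the total count
def pvGather : List String → List (List String) → Nat → Option (List (List String) × Nat)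
  | [], radices, total => some (radices, total)
  | b :: rest, radices, total =>
    match PySem.Dict.get? pvTableB b with
    | some opts => pvGather rest (radices ++ [opts]) (total * opts.length)
    | none => none  -- ValueError in Python; excluded by Pre_

-- B's inner loop: i from n-1 downto 0 with rem, d = divmod(rem, len(radices[i]));
-- transcribed as recursion over the REVERSED radix list (head = last position),
-- each step prepending the element chosen for that position
def pvDecode : List (List String) → Nat → List String
  | [], _ => []
  | o :: revRest, rem => pvDecode revRest (rem / o.length) ++ [o.getD (rem % o.length) ""]

def cog_state_alternatives_alt (cog_state : List String) : List (List String) :=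
  match pvGather cog_state [] 1 with
  | some (radices, total) => (List.range total).map fun k => pvDecode radices.reverse k
  | none => []  -- ValueError in Python; excluded by Pre_

-- ===== PRECONDITION & SPEC =====
-- Pre_ excludes exactly the inputs containing an unsupported bit, where A raises ValueError.
def Pre_cog_state_alternatives (cog_state : List String) : Prop :=
  ∀ b ∈ cog_state, b ∈ (["0", "1", "2", "3", "A", "B", "*"] : List String)
instance (cog_state : List String) : Decidable (Pre_cog_state_alternatives cog_state) := by
  unfold Pre_cog_state_alternatives; infer_instance

def pvWitness_cog_state_alternatives : List String := ["A", "*", "2"]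

def Spec_cog_state_alternatives (cog_state : List String) (out : List (List String)) : Prop := out = cog_state_alternatives_alt cog_state
instance (cog_state : List String) (out : List (List String)) : Decidable (Spec_cog_state_alternatives cog_state out) := by unfold Spec_cog_state_alternatives; infer_instance

-- ===== CLAIM (what is proved, stated in full; the proofs are below) =====
def Claim_equal_cog_state_alternatives : Prop := ∀ (cog_state : List String), Dom_cog_state_alternatives cog_state → Pre_cog_state_alternatives cog_state → Spec_cog_state_alternatives cog_state (cog_state_alternatives cog_state)

-- ===== LEMMAS AND PROOFS =====

-- product of the radix lengths
def pvTotal (pool : List (List String)) : Nat := (pool.map List.length).prod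

-- left-to-right decoder (specification form of B's inner loop)
def pvDec : List (List String) → Nat → List String
  | [], _ => []
  | o :: ls, k => o.getD (k / pvTotal ls) "" :: pvDec ls (k % pvTotal ls)

-- on every supported bit both sides produce the same option list, and it is nonempty
theorem opts_agree (b : String)
    (hb : b ∈ (["0", "1", "2", "3", "A", "B", "*"] : List String)) :
    pvOptA b = PySem.Dict.get? pvTableB b ∧ (pvOptA b).isSome := by
  fin_cases hb <;> decide

-- B's gather loop = A's pool plus the running product, for any accumulator
theorem gather_inv (cs : List String) (hcs : Pre_cog_state_alternatives cs) :
    ∃ pool, pvBuildPool cs = some pool ∧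
      ∀ (acc : List (List String)) (t : Nat),
        pvGather cs acc t = some (acc ++ pool, t * pvTotal pool) := by
  induction cs with
  | nil => exact ⟨[], rfl, fun acc t => by simp [pvGather, pvTotal]⟩
  | cons b rest ih =>
    have hb := hcs b (List.mem_cons_self ..)
    have hrest : Pre_cog_state_alternatives rest := fun x hx => hcs x (List.mem_cons_of_mem _ hx)
    obtain ⟨hagree, hsome⟩ := opts_agree b hb
    obtain ⟨o, ho⟩ := Option.isSome_iff_exists.mp hsome
    obtain ⟨pool, hpool, hgather⟩ := ih hrest
    have hget : PySem.Dict.get? pvTableB b = some o := hagree ▸ ho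
    refine ⟨o :: pool, by simp [pvBuildPool, ho, hpool], fun acc t => ?_⟩
    simp [pvGather, hget, hgather, pvTotal, Nat.mul_assoc]

-- decomposition of range (m * n) into m blocks of n
theorem range_mul (m n : Nat) :
    List.range (m * n) = (List.range m).flatMap fun i => (List.range n).map fun j => i * n + j := by
  induction m with
  | zero => simp
  | succ m ih =>
    rw [Nat.succ_mul, List.range_add, List.range_succ, List.flatMap_append, ← ih]
    simp [List.flatMap_singleton]

-- traversal of a list = traversal of its indices
theorem flatMap_eq_range (o : List String) (f : String → List (List String)) :
    o.flatMap f = (List.range o.length).flatMap fun i => f (o.getD i "") := by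
  induction o with
  | nil => simp
  | cons a as ih =>
    simp only [List.flatMap_cons, List.length_cons, List.range_succ_eq_map, List.flatMap_map,
      List.getD_cons_zero, List.getD_cons_succ]
    rw [ih]

-- itertools.product = enumeration of all ranks decoded left-to-right
theorem product_eq_decode (pool : List (List String)) :
    pvProduct pool = (List.range (pvTotal pool)).map (pvDec pool) := by
  induction pool with
  | nil => simp [pvProduct, pvTotal, pvDec]
  | cons o ls ih =>
    have hT : pvTotal (o :: ls) = o.length * pvTotal ls := by simp [pvTotal]
    rw [pvProduct, hT, range_mul, List.map_flatMap, ih,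
      flatMap_eq_range o (fun x => ((List.range (pvTotal ls)).map (pvDec ls)).map (x :: ·))]
    refine List.flatMap_congr fun i hi => ?_
    rw [List.map_map, List.map_map]
    refine List.map_congr_left fun j hj => ?_
    have hj' : j < pvTotal ls := List.mem_range.mp hj
    have hpos : 0 < pvTotal ls := Nat.pos_of_ne_zero (by omega)
    have h1 : (i * pvTotal ls + j) / pvTotal ls = i := by
      rw [Nat.mul_comm, Nat.mul_add_div hpos, Nat.div_eq_of_lt hj', Nat.add_zero]
    have h2 : (i * pvTotal ls + j) % pvTotal ls = j := by
      rw [Nat.add_comm, Nat.add_mul_mod_self_right, Nat.mod_eq_of_lt hj']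
    simp [pvDec, h1, h2]

-- B's divmod recursion over the reversed list computes pvDec (for in-range ranks)
theorem decode_rev_append (xs : List (List String)) (o : List String) (rem : Nat) :
    pvDecode (xs ++ [o]) rem
      = o.getD (rem / pvTotal xs.reverse % o.length) "" :: pvDecode xs rem := by
  induction xs generalizing rem with
  | nil => simp [pvDecode, pvTotal]
  | cons x xs ih =>
    rw [List.cons_append, pvDecode, ih, pvDecode]
    have : rem / x.length / pvTotal xs.reverse = rem / pvTotal (x :: xs).reverse := by
      rw [Nat.div_div_eq_div_mul]
      congr 1
      simp [pvTotal, Nat.mul_comm]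
    rw [this, List.cons_append]

-- pvDecode only reads rem modulo the product of the lengths
theorem decode_mod (xs : List (List String)) (rem : Nat) :
    pvDecode xs (rem % pvTotal xs.reverse) = pvDecode xs rem := by
  induction xs generalizing rem with
  | nil => simp [pvDecode]
  | cons x xs ih =>
    have hT : pvTotal (x :: xs).reverse = x.length * pvTotal xs.reverse := by
      simp [pvTotal, Nat.mul_comm]
    rw [pvDecode, pvDecode, hT, Nat.mod_mul_right_div_self, ih,
      Nat.mod_mod_of_dvd rem (Dvd.intro _ rfl)]

theorem decode_eq_dec (pool : List (List String)) (k : Nat) (hk : k < pvTotal pool) :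
    pvDecode pool.reverse k = pvDec pool k := by
  induction pool generalizing k with
  | nil => simp [pvDecode, pvDec]
  | cons o ls ih =>
    have hT : pvTotal (o :: ls) = o.length * pvTotal ls := by simp [pvTotal]
    have hpos : 0 < pvTotal ls := by
      rcases Nat.eq_zero_or_pos (pvTotal ls) with h | h
      · exfalso; rw [hT, h, Nat.mul_zero] at hk; omega
      · exact h
    have hdiv : k / pvTotal ls < o.length := by
      rw [Nat.div_lt_iff_lt_mul hpos]; rw [hT] at hk; omega
    rw [List.reverse_cons, decode_rev_append, List.reverse_reverse, pvDec,
      Nat.mod_eq_of_lt hdiv, ← ih _ (Nat.mod_lt _ hpos), ← decode_mod ls.reverse k,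
      List.reverse_reverse]

-- ===== VERDICT (by name: the statement is the Claim_ definition above) =====
theorem cog_state_alternatives_spec : Claim_equal_cog_state_alternatives := by
  intro cs _ hpre
  obtain ⟨pool, hpool, hgather⟩ := gather_inv cs hpre
  show cog_state_alternatives cs = cog_state_alternatives_alt cs
  rw [cog_state_alternatives, cog_state_alternatives_alt, hpool, hgather [] 1]
  simp only [List.nil_append, Nat.one_mul]
  rw [product_eq_decode]
  exact List.map_congr_left fun k hk => (decode_eq_dec pool k (List.mem_range.mp hk)).symm
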